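-- pv_equiv track=rewrite | github.com/castogio/advent-of-code-2023 | day12.py | substitute_valid
-- ===== SOURCE A (Python) =====
-- def is_valid(word: list[str], group_counts: list[int]) -> bool:
--     streak = 0
--     sub_groups_counts = []
--
--     for ch in word:
--         if ch == '#':
--             streak += 1
--         else:
--             if streak:
--                 sub_groups_counts.append(streak)
--                 streak = 0
--     if streak:
--         sub_groups_counts.append(streak)
--
--     return sub_groups_counts == group_counts
--
-- def is_still_valid(word: list[str], group_counts: list[int]) -> bool:
--
--     if '?' not in word:
--         return is_valid(word, group_counts)
--
--     num_fault = sum(1 for ch in word if ch == '#')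
--     num_exp = sum(group_counts)
--     if num_fault > num_exp:
--         return False
--
--     streak = 0
--     sub_groups_counts = []
--
--     for ch in word:
--         if ch == '?':
--             break
--         if ch == '#':
--             streak += 1
--         else:
--             if streak:
--                 sub_groups_counts.append(streak)
--                 streak = 0
--     if streak:
--         sub_groups_counts.append(streak)
--
--     for f, r in zip(sub_groups_counts[:-1], group_counts[:len(sub_groups_counts)-1]):
--         if f > r:
--             return False
--     return True
--
-- def substitute_valid(word: list[str], group_counts: list[int]) -> list[list[str]]:
--
--     if '?' not in word:
--         return [''.join(word)] if is_valid(word, group_counts) else []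
--     else:
--         combinations = []
--         index = word.index('?')
--
--         for char in ['.', '#']:
--             new_list = word.copy()
--             new_list[index] = char
--             if is_still_valid(new_list, group_counts):
--                 combinations.extend(substitute_valid(new_list, group_counts))
--         return combinations
-- ===== SOURCE B (Python) =====
-- from itertools import product
--
-- def is_valid(word: list[str], group_counts: list[int]) -> bool:
--     streak = 0
--     sub_groups_counts = []
--     for ch in word:
--         if ch == '#':
--             streak += 1
--         else:
--             if streak:
--                 sub_groups_counts.append(streak)
--                 streak = 0
--     if streak:
--         sub_groups_counts.append(streak)
--     return sub_groups_counts == group_counts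
--
-- def substitute_valid(word: list[str], group_counts: list[int]) -> list[str]:
--     q = word.count('?')
--     combinations = []
--     for choice in product(['.', '#'], repeat=q):
--         it = iter(choice)
--         filled = [next(it) if ch == '?' else ch for ch in word]
--         if is_valid(filled, group_counts):
--             combinations.append(''.join(filled))
--     return combinations
-- ===== Notes on version B (the rewrite author's own statement) =====
-- stated objective: simpler
-- what changed: Replaced A's recursive backtracking (branch on the first '?', prune with is_still_valid, concatenate sub-results) by a single flat loop over itertools.product(['.','#'], repeat=q) that fills all '?' cells at once and keeps the fill-ins accepted by the same is_valid check.
import Mathlib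
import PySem

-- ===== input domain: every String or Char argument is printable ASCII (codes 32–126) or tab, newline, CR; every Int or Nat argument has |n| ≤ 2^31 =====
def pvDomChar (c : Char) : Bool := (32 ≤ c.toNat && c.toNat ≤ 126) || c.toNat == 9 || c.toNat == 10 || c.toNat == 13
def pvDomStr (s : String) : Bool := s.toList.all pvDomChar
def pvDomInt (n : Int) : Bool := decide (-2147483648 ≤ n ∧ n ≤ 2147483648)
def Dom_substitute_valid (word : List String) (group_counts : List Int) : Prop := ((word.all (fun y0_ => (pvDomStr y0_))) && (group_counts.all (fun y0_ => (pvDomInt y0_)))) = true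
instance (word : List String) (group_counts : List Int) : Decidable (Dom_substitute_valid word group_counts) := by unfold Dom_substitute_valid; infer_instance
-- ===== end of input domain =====

-- B replaces A's recursive backtracking with pruning by one flat enumeration of all 2^q fill-ins
-- of the '?' cells, filtered by the same validity check (objective: simpler; no speed claim).

-- ===== PORT A =====
-- streak-counting loop shared by is_valid (and, on a prefix, by is_still_valid)
def pvGroupsAux : List String → Int → List Int → List Int
  | [], streak, acc => if streak ≠ 0 then acc ++ [streak] else acc
  | ch :: w, streak, acc =>
    if ch == "#" then pvGroupsAux w (streak + 1) acc
    else if streak ≠ 0 then pvGroupsAux w 0 (acc ++ [streak]) else pvGroupsAux w 0 acc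

-- port of is_valid
def pvIsValid (word : List String) (group_counts : List Int) : Bool :=
  pvGroupsAux word 0 [] == group_counts

-- port of is_still_valid ('for ch in word: if ch == '?': break; …' = the same loop on takeWhile)
def pvIsStillValid (word : List String) (group_counts : List Int) : Bool :=
  if word.contains "?" = false then pvIsValid word group_counts
  else
    let num_fault : Int := (word.count "#" : Int)
    let num_exp : Int := group_counts.sum
    if num_fault > num_exp then false
    else
      let sub_groups_counts := pvGroupsAux (word.takeWhile (fun ch => !(ch == "?"))) 0 []
      !(((sub_groups_counts.dropLast).zip
          (PySem.List.slice group_counts none (some ((sub_groups_counts.length : Int) - 1)))).any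
        (fun p => decide (p.1 > p.2)))

-- termination: replacing the first '?' by a non-'?' character lowers the '?' count (cited in decreasing_by)
theorem pvCountSetLt (word : List String) (h : word.contains "?" = true) (c : String)
    (hc : (c == "?") = false) :
    (word.set (word.idxOf "?") c).count "?" < word.count "?" := by
  induction word with
  | nil => simp at h
  | cons x w ih =>
    by_cases hx : x = "?"
    · subst hx
      simp [List.idxOf_cons, List.findIdx_cons, List.count_cons, hc]
    · have hx' : (x == "?") = false := by simpa using hx
      have h' : w.contains "?" = true := by
        have hor : "?" = x ∨ "?" ∈ w := by simpa using h
        rcases hor with h1 | h1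
        · exact absurd h1.symm hx
        · simpa using h1
      simpa [List.idxOf_cons, List.findIdx_cons, hx', List.count_cons] using ih h'

def substitute_valid (word : List String) (group_counts : List Int) : List String :=
  if h : word.contains "?" = false then
    if pvIsValid word group_counts then [PySem.Str.join "" word] else []
  else
    let index := word.idxOf "?"
    -- for char in ['.', '#'] unrolled
    let new1 := word.set index "."
    let comb1 := if pvIsStillValid new1 group_counts
                 then ([] : List String) ++ substitute_valid new1 group_counts else []
    let new2 := word.set index "#"
    if pvIsStillValid new2 group_counts
    then comb1 ++ substitute_valid new2 group_counts else comb1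
termination_by word.count "?"
decreasing_by
  · exact pvCountSetLt word (by simpa using h) "." (by decide)
  · exact pvCountSetLt word (by simpa using h) "#" (by decide)

-- ===== PORT B =====
-- itertools.product(['.', '#'], repeat=n), in product's order (first coordinate slowest)
def pvProd : Nat → List (List String)
  | 0 => [[]]
  | n + 1 => (pvProd n).map (fun t => "." :: t) ++ (pvProd n).map (fun t => "#" :: t)

-- '[next(it) if ch == '?' else ch for ch in word]': consume the choice list at each '?'
def pvFill : List String → List String → List String
  | [], _ => []
  | ch :: w, cs => if ch == "?" then cs.headD "?" :: pvFill w cs.tail else ch :: pvFill w cs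

def substitute_valid_alt (word : List String) (group_counts : List Int) : List String :=
  (pvProd (word.count "?")).foldl
    (fun combinations choice =>
      let filled := pvFill word choice
      if pvIsValid filled group_counts then combinations ++ [PySem.Str.join "" filled]
      else combinations)
    []

-- ===== PRECONDITION & SPEC =====
def Spec_substitute_valid (word : List String) (group_counts : List Int) (out : List String) : Prop := out = substitute_valid_alt word group_counts
instance (word : List String) (group_counts : List Int) (out : List String) : Decidable (Spec_substitute_valid word group_counts out) := by unfold Spec_substitute_valid; infer_instance

-- ===== CLAIM (what is proved, stated in full; the proofs are below) =====
def Claim_equal_substitute_valid : Prop := ∀ (word : List String) (group_counts : List Int), Dom_substitute_valid word group_counts → Spec_substitute_valid word group_counts (substitute_valid word group_counts)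

-- ===== LEMMAS AND PROOFS =====

theorem pv_alt_eq_filter (word : List String) (gc : List Int) :
    substitute_valid_alt word gc =
      ((pvProd (word.count "?")).filter (fun cs => pvIsValid (pvFill word cs) gc)).map
        (fun cs => PySem.Str.join "" (pvFill word cs)) := by
  simpa [substitute_valid_alt] using
    PySem.List.foldl_append_if (l := pvProd (word.count "?"))
      (p := fun cs => pvIsValid (pvFill word cs) gc)
      (f := fun cs => PySem.Str.join "" (pvFill word cs)) (acc := [])

theorem pvGroupsAux_acc (w : List String) : ∀ s acc, pvGroupsAux w s acc = acc ++ pvGroupsAux w s [] := by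
  induction w with
  | nil => intro s acc; by_cases h : s = 0 <;> simp [pvGroupsAux, h]
  | cons x w ih =>
    intro s acc
    by_cases hx : (x == "#") = true
    · simp only [pvGroupsAux, hx, if_pos]
      exact ih (s + 1) acc
    · have hx' : (x == "#") = false := by simpa using hx
      by_cases hs : s = 0
      · simp only [pvGroupsAux, hx', Bool.false_eq_true, if_false, hs, ne_eq,
          not_true_eq_false, if_neg, not_false_eq_true]
        exact ih 0 acc
      · simp only [pvGroupsAux, hx', Bool.false_eq_true, if_false, ne_eq, hs,
          not_false_eq_true, if_pos, List.nil_append]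
        rw [ih 0 (acc ++ [s]), ih 0 [s]]
        simp

theorem pvGroupsAux_sum (w : List String) : ∀ s : Int, (pvGroupsAux w s []).sum = s + (w.count "#" : Int) := by
  induction w with
  | nil => intro s; by_cases h : s = 0 <;> simp [pvGroupsAux, h]
  | cons x w ih =>
    intro s
    by_cases hx : (x == "#") = true
    · have hx2 : x = "#" := by simpa using hx
      simp only [pvGroupsAux, hx, if_pos]
      rw [ih (s + 1)]
      simp [List.count_cons, hx2]
      ring
    · have hx' : (x == "#") = false := by simpa using hx
      have hx2 : ¬ x = "#" := by simpa using hx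
      by_cases hs : s = 0
      · simp only [pvGroupsAux, hx', Bool.false_eq_true, if_false, hs, ne_eq,
          not_true_eq_false, if_neg, not_false_eq_true]
        rw [ih 0]
        simp [List.count_cons, hx2]
      · simp only [pvGroupsAux, hx', Bool.false_eq_true, if_false, ne_eq, hs,
          not_false_eq_true, if_pos, List.nil_append]
        rw [pvGroupsAux_acc, List.sum_append, ih 0]
        simp [List.count_cons, hx2]

theorem pvGroupsAux_prefix (t : List String) : ∀ (u : List String) (s : Int),
    (pvGroupsAux t s []).dropLast <+: pvGroupsAux (t ++ u) s [] := by
  induction t with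
  | nil =>
    intro u s
    by_cases h : s = 0 <;> simp [pvGroupsAux, h]
  | cons x t ih =>
    intro u s
    by_cases hx : (x == "#") = true
    · simp only [List.cons_append, pvGroupsAux, hx, if_pos]
      exact ih u (s + 1)
    · have hx' : (x == "#") = false := by simpa using hx
      by_cases hs : s = 0
      · simp only [List.cons_append, pvGroupsAux, hx', Bool.false_eq_true, if_false, hs, ne_eq,
          not_true_eq_false, if_neg, not_false_eq_true]
        exact ih u 0
      · simp only [List.cons_append, pvGroupsAux, hx', Bool.false_eq_true, if_false, ne_eq, hs,
          not_false_eq_true, if_pos, List.nil_append]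
        rw [pvGroupsAux_acc t 0 [s], pvGroupsAux_acc (t ++ u) 0 [s]]
        rcases eq_or_ne (pvGroupsAux t 0 []) [] with h0 | h0
        · simp [h0]
        · rw [show [s] ++ pvGroupsAux t 0 [] = s :: pvGroupsAux t 0 [] from rfl,
            show [s] ++ pvGroupsAux (t ++ u) 0 [] = s :: pvGroupsAux (t ++ u) 0 [] from rfl,
            List.dropLast_cons_of_ne_nil h0]
          exact List.cons_prefix_cons.mpr ⟨rfl, ih u 0⟩

theorem pvFill_append (t : List String) (ht : "?" ∉ t) : ∀ (u cs : List String),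
    pvFill (t ++ u) cs = t ++ pvFill u cs := by
  induction t with
  | nil => intro u cs; simp
  | cons x t ih =>
    intro u cs
    have hx : (x == "?") = false := by
      simp only [beq_eq_false_iff_ne, ne_eq]
      intro h; exact ht (by simp [h])
    simp [pvFill, hx, ih (by intro h; exact ht (by simp [h]))]

theorem pvFill_noq (w : List String) (hw : "?" ∉ w) (cs : List String) : pvFill w cs = w := by
  simpa [pvFill] using pvFill_append w hw [] cs

theorem pvFill_count (w : List String) : ∀ cs, w.count "#" ≤ (pvFill w cs).count "#" := by
  induction w with
  | nil => intro cs; simp [pvFill]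
  | cons x w ih =>
    intro cs
    by_cases hx : (x == "?") = true
    · have hx2 : ¬ x = "#" := by simp_all
      simp only [pvFill, hx, if_pos, List.count_cons]
      have := ih cs.tail
      by_cases hh : (cs.headD "?" == "#") = true <;> simp [hh, hx2, this] <;> omega
    · have hx' : (x == "?") = false := by simpa using hx
      simp only [pvFill, hx', Bool.false_eq_true, if_false, List.count_cons]
      have := ih cs
      by_cases hh : (x == "#") = true <;> simp [hh, this] <;> omega

theorem pvZipSelf (l : List Int) : ∀ p ∈ l.zip l, p.1 = p.2 := by
  induction l with
  | nil => simp
  | cons x l ih =>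
    intro p hp
    rcases List.mem_cons.mp hp with h | h
    · simp [h]
    · exact ih p h

-- every pruned branch is empty: if is_still_valid fails, no fill-in of the word is valid
theorem pvPruneSound (v : List String) (gc : List Int)
    (h : pvIsStillValid v gc = false) :
    ∀ cs, pvIsValid (pvFill v cs) gc = false := by
  intro cs
  by_contra hval
  have hval : pvIsValid (pvFill v cs) gc = true := by
    cases hvb : pvIsValid (pvFill v cs) gc
    · exact absurd hvb hval
    · rfl
  have hgc : pvGroupsAux (pvFill v cs) 0 [] = gc := by
    simpa [pvIsValid] using hval
  by_cases hq : v.contains "?" = false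
  · have hnv : "?" ∉ v := by simpa using hq
    rw [pvIsStillValid, if_pos hq] at h
    rw [pvFill_noq v hnv cs] at hval
    rw [hval] at h
    exact absurd h (by simp)
  · rw [pvIsStillValid, if_neg hq] at h
    by_cases hf : ((v.count "#" : Int) > gc.sum)
    · rw [if_pos hf] at h
      have hsum : ((pvFill v cs).count "#" : Int) = gc.sum := by
        rw [← hgc, pvGroupsAux_sum]; ring
      have hle := pvFill_count v cs
      have hle' : ((v.count "#" : Int)) ≤ ((pvFill v cs).count "#" : Int) := by exact_mod_cast hle
      omega
    · rw [if_neg hf] at h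
      -- the zip check failed: some completed group exceeds its target, yet those
      -- groups form a prefix of the groups of every fill-in, which must equal gc
      simp only [Bool.not_eq_false', List.any_eq_true, decide_eq_true_eq] at h
      obtain ⟨p, hp, hgt⟩ := h
      set t := v.takeWhile (fun ch => !(ch == "?")) with ht
      set sg := pvGroupsAux t 0 [] with hsg
      have hnt : "?" ∉ t := by
        intro hmem
        have := List.mem_takeWhile_imp hmem
        simp at this
      have hpre : sg.dropLast <+: gc := by
        have hsplit : v = t ++ v.dropWhile (fun ch => !(ch == "?")) :=
          (List.takeWhile_append_dropWhile).symm
        have hfill : pvFill v cs = t ++ pvFill (v.dropWhile (fun ch => !(ch == "?"))) cs := by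
          conv_lhs => rw [hsplit]
          exact pvFill_append t hnt _ cs
        rw [← hgc, hfill]
        exact pvGroupsAux_prefix t _ 0
      rcases eq_or_ne sg [] with h0 | h0
      · rw [h0] at hp; simp at hp
      · obtain ⟨k, hk⟩ : ∃ k, sg.length = k + 1 :=
          ⟨sg.length - 1, (Nat.succ_pred_eq_of_pos (List.length_pos_of_ne_nil h0)).symm⟩
        have hcast : ((sg.length : Int) - 1) = ((k : Nat) : Int) := by
          rw [hk]; push_cast; ring
        have hslice : PySem.List.slice gc none (some ((sg.length : Int) - 1)) = gc.take k := by
          rw [hcast, PySem.List.slice_to_natCast]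
        have hlen : sg.dropLast.length = k := by simp [hk]
        have htake : gc.take k = sg.dropLast := by
          have := List.prefix_iff_eq_take.mp hpre
          rw [hlen] at this
          exact this.symm
        rw [hslice, htake] at hp
        have := pvZipSelf sg.dropLast p hp
        omega

theorem pvPruneEmpty (v : List String) (gc : List Int)
    (h : pvIsStillValid v gc = false) : substitute_valid_alt v gc = [] := by
  rw [pv_alt_eq_filter]
  have : (pvProd (v.count "?")).filter (fun cs => pvIsValid (pvFill v cs) gc) = [] := by
    apply List.filter_eq_nil_iff.mpr
    intro cs _
    simp [pvPruneSound v gc h cs]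
  rw [this]; rfl

theorem pvSetAt (t r : List String) (c : String) : (t ++ "?" :: r).set t.length c = t ++ c :: r := by
  induction t with
  | nil => rfl
  | cons x t ih => simp [List.set_cons_succ, ih]

theorem pvIdxOf_takeWhile (w : List String) (h : "?" ∈ w) :
    w.idxOf "?" = (w.takeWhile (fun ch => !(ch == "?"))).length := by
  induction w with
  | nil => simp at h
  | cons x w ih =>
    by_cases hx : x = "?"
    · subst hx; simp [List.idxOf_cons, List.findIdx_cons, List.takeWhile_cons]
    · have hx' : (x == "?") = false := by simpa using hx
      have h' : "?" ∈ w := by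
        rcases List.mem_cons.mp h with h1 | h1
        · exact absurd h1.symm hx
        · exact h1
      simp [List.idxOf_cons, List.findIdx_cons, hx', List.takeWhile_cons, ih h']

theorem pvSplitMem (w : List String) (h : "?" ∈ w) :
    ∃ t r, w = t ++ "?" :: r ∧ "?" ∉ t ∧ w.takeWhile (fun ch => !(ch == "?")) = t := by
  refine ⟨w.takeWhile (fun ch => !(ch == "?")), (w.dropWhile (fun ch => !(ch == "?"))).tail, ?_, ?_, rfl⟩
  · have hd : w.dropWhile (fun ch => !(ch == "?")) ≠ [] := by
      intro h0
      have := List.dropWhile_eq_nil_iff.mp h0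
      have := this "?" h
      simp at this
    obtain ⟨a, l', hal⟩ := List.exists_cons_of_ne_nil hd
    have ha : a = "?" := by
      have hp := List.head_dropWhile_not (p := fun ch => !(ch == "?")) hd
      have hh : (w.dropWhile (fun ch => !(ch == "?"))).head hd = a := by simp [hal]
      rw [hh] at hp; simpa using hp
    conv_lhs => rw [← List.takeWhile_append_dropWhile (p := fun ch => !(ch == "?")) (l := w)]
    rw [hal, ha]
    simp
  · intro hmem
    have := List.mem_takeWhile_imp hmem
    simp at this

theorem pvCountSplitQ (t r : List String) (ht : "?" ∉ t) :
    (t ++ "?" :: r).count "?" = r.count "?" + 1 := by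
  simp [List.count_append, List.count_cons, List.count_eq_zero.mpr ht, Nat.add_comm]

theorem pvCountSplitC (t r : List String) (c : String) (ht : "?" ∉ t) (hc : ¬ c = "?") :
    (t ++ c :: r).count "?" = r.count "?" := by
  simp [List.count_append, List.count_cons, List.count_eq_zero.mpr ht, hc]

theorem pvFillHeadQ (t r cs : List String) (c : String) (ht : "?" ∉ t) :
    pvFill (t ++ "?" :: r) (c :: cs) = t ++ c :: pvFill r cs := by
  rw [pvFill_append t ht]; simp [pvFill]

theorem pvFillHeadC (t r cs : List String) (c : String) (ht : "?" ∉ t) (hc : (c == "?") = false) :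
    pvFill (t ++ c :: r) cs = t ++ c :: pvFill r cs := by
  rw [pvFill_append t ht]; simp [pvFill, hc]

theorem pvAltBase (w : List String) (gc : List Int) (h : "?" ∉ w) :
    substitute_valid_alt w gc = if pvIsValid w gc then [PySem.Str.join "" w] else [] := by
  rw [pv_alt_eq_filter, List.count_eq_zero.mpr h]
  by_cases hv : pvIsValid w gc = true
  · simp [pvProd, pvFill_noq w h, hv]
  · have hv' : pvIsValid w gc = false := by simpa using hv
    simp [pvProd, pvFill_noq w h, hv']

theorem pvAltSplit (t r : List String) (gc : List Int) (ht : "?" ∉ t) :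
    substitute_valid_alt (t ++ "?" :: r) gc =
      substitute_valid_alt (t ++ "." :: r) gc ++ substitute_valid_alt (t ++ "#" :: r) gc := by
  rw [pv_alt_eq_filter, pv_alt_eq_filter, pv_alt_eq_filter]
  rw [pvCountSplitQ t r ht, pvCountSplitC t r "." ht (by decide), pvCountSplitC t r "#" ht (by decide)]
  rw [show pvProd (r.count "?" + 1)
      = (pvProd (r.count "?")).map (fun s => "." :: s) ++ (pvProd (r.count "?")).map (fun s => "#" :: s)
      from rfl]
  rw [List.filter_append, List.map_append]
  have hd : ∀ cs, pvFill (t ++ "?" :: r) ("." :: cs) = pvFill (t ++ "." :: r) cs := by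
    intro cs
    rw [pvFillHeadQ t r cs "." ht, pvFillHeadC t r cs "." ht (by decide)]
  have hh : ∀ cs, pvFill (t ++ "?" :: r) ("#" :: cs) = pvFill (t ++ "#" :: r) cs := by
    intro cs
    rw [pvFillHeadQ t r cs "#" ht, pvFillHeadC t r cs "#" ht (by decide)]
  congr 1
  · rw [List.filter_map, List.map_map]
    have hp : ((fun cs => pvIsValid (pvFill (t ++ "?" :: r) cs) gc) ∘ (fun s => "." :: s))
        = (fun cs => pvIsValid (pvFill (t ++ "." :: r) cs) gc) :=
      funext fun cs => by simp [Function.comp, hd cs]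
    have hf : ((fun cs => PySem.Str.join "" (pvFill (t ++ "?" :: r) cs)) ∘ (fun s => "." :: s))
        = (fun cs => PySem.Str.join "" (pvFill (t ++ "." :: r) cs)) :=
      funext fun cs => by simp [Function.comp, hd cs]
    rw [hp, hf]
  · rw [List.filter_map, List.map_map]
    have hp : ((fun cs => pvIsValid (pvFill (t ++ "?" :: r) cs) gc) ∘ (fun s => "#" :: s))
        = (fun cs => pvIsValid (pvFill (t ++ "#" :: r) cs) gc) :=
      funext fun cs => by simp [Function.comp, hh cs]
    have hf : ((fun cs => PySem.Str.join "" (pvFill (t ++ "?" :: r) cs)) ∘ (fun s => "#" :: s))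
        = (fun cs => PySem.Str.join "" (pvFill (t ++ "#" :: r) cs)) :=
      funext fun cs => by simp [Function.comp, hh cs]
    rw [hp, hf]

theorem pvMain (n : Nat) : ∀ (w : List String) (gc : List Int), w.count "?" = n →
    substitute_valid w gc = substitute_valid_alt w gc := by
  induction n using Nat.strong_induction_on with
  | _ n ih =>
    intro w gc hn
    by_cases hq : w.contains "?" = false
    · rw [substitute_valid, dif_pos hq]
      exact (pvAltBase w gc (by simpa using hq)).symm
    · have hmem : "?" ∈ w := by
        have : w.contains "?" = true := by
          cases hc : w.contains "?"
          · exact absurd hc hq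
          · rfl
        simpa using this
      obtain ⟨t, r, hw, hnt, -⟩ := pvSplitMem w hmem
      have hidx : w.idxOf "?" = t.length := by
        rw [pvIdxOf_takeWhile w hmem, hw, List.takeWhile_append]
        have h1 : t.takeWhile (fun ch => !(ch == "?")) = t := by
          apply List.takeWhile_eq_self_iff.mpr
          intro x hx
          have : ¬ x = "?" := fun hh => hnt (hh ▸ hx)
          simpa using this
        simp [h1]
      have hset1 : w.set (w.idxOf "?") "." = t ++ "." :: r := by
        rw [hidx, hw, pvSetAt]
      have hset2 : w.set (w.idxOf "?") "#" = t ++ "#" :: r := by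
        rw [hidx, hw, pvSetAt]
      have hcnt : r.count "?" < n := by
        rw [← hn, hw, pvCountSplitQ t r hnt]
        omega
      have hc1 : (t ++ "." :: r).count "?" = r.count "?" := pvCountSplitC t r "." hnt (by decide)
      have hc2 : (t ++ "#" :: r).count "?" = r.count "?" := pvCountSplitC t r "#" hnt (by decide)
      have e1 : (if pvIsStillValid (t ++ "." :: r) gc then substitute_valid (t ++ "." :: r) gc else [])
          = substitute_valid_alt (t ++ "." :: r) gc := by
        by_cases hs : pvIsStillValid (t ++ "." :: r) gc = true
        · rw [if_pos hs]; exact ih (r.count "?") hcnt _ gc hc1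
        · have hs' : pvIsStillValid (t ++ "." :: r) gc = false := by simpa using hs
          rw [if_neg hs, pvPruneEmpty _ gc hs']
      have e2 : (if pvIsStillValid (t ++ "#" :: r) gc then substitute_valid (t ++ "#" :: r) gc else [])
          = substitute_valid_alt (t ++ "#" :: r) gc := by
        by_cases hs : pvIsStillValid (t ++ "#" :: r) gc = true
        · rw [if_pos hs]; exact ih (r.count "?") hcnt _ gc hc2
        · have hs' : pvIsStillValid (t ++ "#" :: r) gc = false := by simpa using hs
          rw [if_neg hs, pvPruneEmpty _ gc hs']
      rw [substitute_valid, dif_neg hq]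
      simp only [hset1, hset2]
      rw [show w = t ++ "?" :: r from hw, pvAltSplit t r gc hnt]
      rw [← e1, ← e2]
      by_cases hs1 : pvIsStillValid (t ++ "." :: r) gc = true <;>
        by_cases hs2 : pvIsStillValid (t ++ "#" :: r) gc = true <;>
          simp [hs1, hs2]

-- ===== VERDICT (by name: the statement is the Claim_ definition above) =====
theorem substitute_valid_spec : Claim_equal_substitute_valid := by
  intro word group_counts _
  show substitute_valid word group_counts = substitute_valid_alt word group_counts
  exact pvMain (word.count "?") word group_counts rfl
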